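-- pv_equiv track=rewrite | github.com/IronAdamant/PythonBol-Translator | src/cobol_safe_translator/arithmetic_translators.py | _merge_spaced_subscripts
-- ===== SOURCE A (Python) =====
-- _COMPUTE_OPERATORS = frozenset({"+", "-", "*", "/", "(", ")", "**"})
--
-- _BITWISE_OPS: dict[str, str] = {
--     "B-AND": "&", "B-OR": "|", "B-XOR": "^", "B-NOT": "~",
--     "B-SHIFT-L": "<<", "B-SHIFT-R": ">>",
-- }
--
-- def _merge_spaced_subscripts(tokens: list[str]) -> list[str]:
--     """Merge space-separated subscripts into their parent identifiers.
--
--     In COBOL, ``TABLE (1 2)`` is equivalent to ``TABLE(1 2)``.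
--     The tokenizer may split these when a space precedes the paren.
--     This function re-attaches ``(`` ... ``)`` groups to the preceding
--     identifier so that resolve_operand can handle them properly.
--
--     Only merges when the token before ``(`` looks like a COBOL
--     identifier (contains a letter) and is NOT an arithmetic operator
--     or keyword.
--     """
--     result: list[str] = []
--     i = 0
--     while i < len(tokens):
--         tok = tokens[i]
--         # Check if this is a standalone "(" preceded by an identifier
--         if (tok == "(" and result
--                 and result[-1] not in _COMPUTE_OPERATORS
--                 and result[-1].upper() not in _BITWISE_OPS
--                 and result[-1].upper() not in ("=", "ROUNDED", "FUNCTION",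
--                                                 "LENGTH", "OF", "IN",
--                                                 "NOT", "AND", "OR")
--                 and any(c.isalpha() for c in result[-1])):
--             # Collect tokens until closing ")"
--             depth = 1
--             inner_tokens: list[str] = []
--             j = i + 1
--             while j < len(tokens) and depth > 0:
--                 if tokens[j] == "(":
--                     depth += 1
--                 elif tokens[j] == ")":
--                     depth -= 1
--                     if depth == 0:
--                         break
--                 if tokens[j] != ",":  # skip standalone commas
--                     inner_tokens.append(tokens[j])
--                 j += 1
--             # Merge: attach (inner) to the identifier
--             inner = " ".join(inner_tokens)
--             result[-1] = f"{result[-1]}({inner})"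
--             i = j + 1  # skip past closing ")"
--         else:
--             result.append(tok)
--             i += 1
--     return result
-- ===== SOURCE B (Python) =====
-- _COMPUTE_OPERATORS = frozenset({"+", "-", "*", "/", "(", ")", "**"})
--
-- _BITWISE_OPS = {
--     "B-AND": "&", "B-OR": "|", "B-XOR": "^", "B-NOT": "~",
--     "B-SHIFT-L": "<<", "B-SHIFT-R": ">>",
-- }
--
-- def _attachable(tok):
--     """True if a '(' group may be re-attached to tok."""
--     return (tok not in _COMPUTE_OPERATORS
--             and tok.upper() not in _BITWISE_OPS
--             and tok.upper() not in ("=", "ROUNDED", "FUNCTION", "LENGTH",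
--                                     "OF", "IN", "NOT", "AND", "OR")
--             and any(c.isalpha() for c in tok))
--
-- def _merge_spaced_subscripts(tokens):
--     """Single flat pass with a merging flag and a paren-depth counter."""
--     result = []
--     merging = False
--     depth = 0
--     inner = []
--     for tok in tokens:
--         if merging:
--             if tok == "(":
--                 depth += 1
--                 inner.append(tok)
--             elif tok == ")":
--                 if depth == 1:
--                     result[-1] = f"{result[-1]}({' '.join(inner)})"
--                     merging = False
--                     depth = 0
--                     inner = []
--                 else:
--                     depth -= 1
--                     inner.append(tok)
--             elif tok != ",":
--                 inner.append(tok)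
--         elif tok == "(" and result and _attachable(result[-1]):
--             merging = True
--             depth = 1
--             inner = []
--         else:
--             result.append(tok)
--     if merging:
--         result[-1] = f"{result[-1]}({' '.join(inner)})"
--     return result
-- ===== Notes on version B (the rewrite author's own statement) =====
-- stated objective: simpler
-- what changed: Replaced A's nested index loops (an outer while with an inner scan collecting up to the matching ')' and an index jump past it) by a single flat for-loop over the tokens maintaining a merging flag, a paren-depth counter and an inner-token buffer, attaching the buffer to result[-1] when depth returns to 0 (or at end of input).
import Mathlib
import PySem

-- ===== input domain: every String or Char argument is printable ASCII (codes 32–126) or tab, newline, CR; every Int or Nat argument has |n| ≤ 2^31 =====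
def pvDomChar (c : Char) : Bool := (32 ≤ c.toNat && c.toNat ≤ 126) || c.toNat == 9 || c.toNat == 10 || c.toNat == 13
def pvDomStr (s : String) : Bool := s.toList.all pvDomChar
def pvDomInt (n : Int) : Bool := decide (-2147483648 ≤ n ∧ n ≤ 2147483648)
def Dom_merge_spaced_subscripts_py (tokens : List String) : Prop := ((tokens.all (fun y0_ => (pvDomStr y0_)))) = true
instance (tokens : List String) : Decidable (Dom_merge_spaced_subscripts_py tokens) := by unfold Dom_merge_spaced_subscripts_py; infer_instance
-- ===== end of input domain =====

-- B replaces A's nested scan (inner index loop collecting up to the matching ')', then an index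
-- jump) by one flat pass maintaining a merging flag, a depth counter and a buffer; objective: simpler.

-- ===== PORT A =====
-- module constant _COMPUTE_OPERATORS (a frozenset)
def pvComputeOps : PySem.Set String :=
  PySem.Set.ofList ["+", "-", "*", "/", "(", ")", "**"]
-- module constant _BITWISE_OPS (a dict; only key membership is used)
def pvBitwiseOps : PySem.Dict String String :=
  PySem.Dict.ofList
    [("B-AND", "&"), ("B-OR", "|"), ("B-XOR", "^"), ("B-NOT", "~"),
     ("B-SHIFT-L", "<<"), ("B-SHIFT-R", ">>")]
-- the tuple ("=", "ROUNDED", …)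
def pvKeywords : List String :=
  ["=", "ROUNDED", "FUNCTION", "LENGTH", "OF", "IN", "NOT", "AND", "OR"]

-- A's inner `while j < len(tokens) and depth > 0` loop; returns (inner_tokens, j).
-- `fuel` only makes the while-loop structural (any fuel ≥ len(tokens) - j behaves like the loop).
def mergeInnerA (tokens : List String) (fuel : Nat) (j : Nat) (depth : Int)
    (inner : List String) : List String × Nat :=
  match fuel with
  | 0 => (inner, j)
  | fuel + 1 =>
    if j < tokens.length ∧ depth > 0 then
      let t := tokens.getD j ""
      if t = "(" then
        mergeInnerA tokens fuel (j + 1) (depth + 1) (inner ++ [t])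
      else if t = ")" then
        if depth - 1 = 0 then (inner, j)  -- break before the comma check: ")" not appended
        else mergeInnerA tokens fuel (j + 1) (depth - 1) (inner ++ [t])
      else if t = "," then
        mergeInnerA tokens fuel (j + 1) depth inner  -- skip standalone commas
      else
        mergeInnerA tokens fuel (j + 1) depth (inner ++ [t])
    else (inner, j)

-- A's outer `while i < len(tokens)` loop (the guard on result[-1] inlined, as in A);
-- `fuel` again only makes the loop structural: i grows by ≥ 1 each iteration.
def mergeOuterA (tokens : List String) (fuel : Nat) (i : Nat) (result : List String) :
    List String :=
  match fuel with
  | 0 => result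
  | fuel + 1 =>
    if i < tokens.length then
      let tok := tokens.getD i ""
      if tok = "(" ∧ result ≠ [] ∧
          ¬ pvComputeOps.contains (result.getLastD "") = true ∧
          ¬ pvBitwiseOps.contains (PySem.Str.upper (result.getLastD "")) = true ∧
          (PySem.Str.upper (result.getLastD "")) ∉ pvKeywords ∧
          (result.getLastD "").toList.any (fun c => PySem.Chars.isalpha c) = true then
        let p := mergeInnerA tokens tokens.length (i + 1) 1 []
        mergeOuterA tokens fuel (p.2 + 1)
          (result.dropLast ++
            [result.getLastD "" ++ "(" ++ PySem.Str.join " " p.1 ++ ")"])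
      else
        mergeOuterA tokens fuel (i + 1) (result ++ [tok])
    else result

def merge_spaced_subscripts_py (tokens : List String) : List String :=
  mergeOuterA tokens (tokens.length + 1) 0 []

-- ===== PORT B =====
-- Source B's helper _attachable
def pvAttachable (s : String) : Bool :=
  !(pvComputeOps.contains s) &&
  !(pvBitwiseOps.contains (PySem.Str.upper s)) &&
  !(pvKeywords.contains (PySem.Str.upper s)) &&
  s.toList.any (fun c => PySem.Chars.isalpha c)

-- Source B's `result[-1] = f"{result[-1]}({' '.join(inner)})"`
def pvAttach (result inner : List String) : List String :=
  result.dropLast ++ [result.getLastD "" ++ "(" ++ PySem.Str.join " " inner ++ ")"]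

-- Source B's single flat pass: state = (result, merging, depth, inner)
def mergeGoB (rest result : List String) (merging : Bool) (depth : Int)
    (inner : List String) : List String :=
  match rest with
  | [] => if merging then pvAttach result inner else result
  | t :: rs =>
    if merging then
      if t = "(" then mergeGoB rs result true (depth + 1) (inner ++ [t])
      else if t = ")" then
        if depth = 1 then mergeGoB rs (pvAttach result inner) false 0 []
        else mergeGoB rs result true (depth - 1) (inner ++ [t])
      else if t = "," then mergeGoB rs result true depth inner
      else mergeGoB rs result true depth (inner ++ [t])
    else if t = "(" ∧ result ≠ [] ∧ pvAttachable (result.getLastD "") = true then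
      mergeGoB rs result true 1 []
    else
      mergeGoB rs (result ++ [t]) false 0 []

def merge_spaced_subscripts_py_alt (tokens : List String) : List String :=
  mergeGoB tokens [] false 0 []

-- ===== PRECONDITION & SPEC =====
def Spec_merge_spaced_subscripts_py (tokens : List String) (out : List String) : Prop := out = merge_spaced_subscripts_py_alt tokens
instance (tokens : List String) (out : List String) : Decidable (Spec_merge_spaced_subscripts_py tokens out) := by unfold Spec_merge_spaced_subscripts_py; infer_instance

-- ===== CLAIM (what is proved, stated in full; the proofs are below) =====
def Claim_equal_merge_spaced_subscripts_py : Prop := ∀ (tokens : List String), Dom_merge_spaced_subscripts_py tokens → Spec_merge_spaced_subscripts_py tokens (merge_spaced_subscripts_py tokens)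

-- ===== LEMMAS AND PROOFS =====

theorem attachable_iff (s : String) :
    (¬ pvComputeOps.contains s = true ∧
     ¬ pvBitwiseOps.contains (PySem.Str.upper s) = true ∧
     (PySem.Str.upper s) ∉ pvKeywords ∧
     s.toList.any (fun c => PySem.Chars.isalpha c) = true) ↔
    pvAttachable s = true := by
  simp [pvAttachable, and_assoc]

theorem drop_eq_getD_cons {tokens : List String} {j : Nat} (h : j < tokens.length) :
    tokens.drop j = tokens.getD j "" :: tokens.drop (j + 1) := by
  rw [List.getD_eq_getElem _ _ h]
  exact (List.drop_eq_getElem_cons h)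

theorem mergeInnerA_snd_ge (tokens : List String) (fuel : Nat) :
    ∀ (j : Nat) (depth : Int) (inner : List String),
      j ≤ (mergeInnerA tokens fuel j depth inner).2 := by
  induction fuel with
  | zero => intro j depth inner; simp [mergeInnerA]
  | succ fuel ih =>
    intro j depth inner
    rw [mergeInnerA]
    by_cases h : j < tokens.length ∧ depth > 0
    · rw [if_pos h]
      by_cases ht1 : tokens.getD j "" = "("
      · rw [if_pos ht1]; have := ih (j + 1) (depth + 1) (inner ++ [tokens.getD j ""]); omega
      · rw [if_neg ht1]
        by_cases ht2 : tokens.getD j "" = ")"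
        · rw [if_pos ht2]
          by_cases hd : depth - 1 = 0
          · rw [if_pos hd]
          · rw [if_neg hd]
            have := ih (j + 1) (depth - 1) (inner ++ [tokens.getD j ""]); omega
        · rw [if_neg ht2]
          by_cases ht3 : tokens.getD j "" = ","
          · rw [if_pos ht3]; have := ih (j + 1) depth inner; omega
          · rw [if_neg ht3]
            have := ih (j + 1) depth (inner ++ [tokens.getD j ""]); omega
    · rw [if_neg h]

-- B's merging state simulates A's inner loop; both then continue at index j'+1
theorem goB_merging_eq (tokens : List String) (fuel : Nat) :
    ∀ (j : Nat) (depth : Int) (inner result : List String), 1 ≤ depth →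
      tokens.length ≤ fuel + j →
      mergeGoB (tokens.drop j) result true depth inner =
        mergeGoB (tokens.drop ((mergeInnerA tokens fuel j depth inner).2 + 1))
          (pvAttach result (mergeInnerA tokens fuel j depth inner).1) false 0 [] := by
  induction fuel with
  | zero =>
    intro j depth inner result _ hlen
    rw [mergeInnerA]
    rw [List.drop_eq_nil_of_le (by omega : tokens.length ≤ j),
      List.drop_eq_nil_of_le (by omega), mergeGoB, mergeGoB]
    simp
  | succ fuel ih =>
    intro j depth inner result hd hlen
    rw [mergeInnerA]
    by_cases h : j < tokens.length ∧ depth > 0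
    · rw [if_pos h, drop_eq_getD_cons h.1, mergeGoB]
      simp only [if_true]
      by_cases ht1 : tokens.getD j "" = "("
      · rw [if_pos ht1, if_pos ht1]
        exact ih (j + 1) (depth + 1) (inner ++ [tokens.getD j ""]) result (by omega) (by omega)
      · rw [if_neg ht1, if_neg ht1]
        by_cases ht2 : tokens.getD j "" = ")"
        · rw [if_pos ht2, if_pos ht2]
          by_cases hdd : depth - 1 = 0
          · rw [if_pos hdd, if_pos (by omega : depth = 1)]
          · rw [if_neg hdd, if_neg (by omega : ¬ depth = 1)]
            exact ih (j + 1) (depth - 1) (inner ++ [tokens.getD j ""]) result (by omega) (by omega)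
        · rw [if_neg ht2, if_neg ht2]
          by_cases ht3 : tokens.getD j "" = ","
          · rw [if_pos ht3, if_pos ht3]
            exact ih (j + 1) depth inner result hd (by omega)
          · rw [if_neg ht3, if_neg ht3]
            exact ih (j + 1) depth (inner ++ [tokens.getD j ""]) result hd (by omega)
    · rw [if_neg h]
      have hj : tokens.length ≤ j := by
        rcases Nat.lt_or_ge j tokens.length with h1 | _
        · exact absurd ⟨h1, by omega⟩ h
        · omega
      rw [List.drop_eq_nil_of_le hj, List.drop_eq_nil_of_le (by omega), mergeGoB, mergeGoB]
      simp

-- A's outer loop equals B's non-merging state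
theorem outerA_eq_goB (tokens : List String) (fuel : Nat) :
    ∀ (i : Nat) (result : List String), tokens.length ≤ fuel + i →
      mergeOuterA tokens fuel i result = mergeGoB (tokens.drop i) result false 0 [] := by
  induction fuel with
  | zero =>
    intro i result hlen
    rw [mergeOuterA, List.drop_eq_nil_of_le (by omega : tokens.length ≤ i), mergeGoB]
    simp
  | succ fuel ih =>
    intro i result hlen
    rw [mergeOuterA]
    by_cases h : i < tokens.length
    · rw [if_pos h, drop_eq_getD_cons h, mergeGoB]
      simp only [Bool.false_eq_true, if_false]
      by_cases hguard : tokens.getD i "" = "(" ∧ result ≠ [] ∧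
          ¬ pvComputeOps.contains (result.getLastD "") = true ∧
          ¬ pvBitwiseOps.contains (PySem.Str.upper (result.getLastD "")) = true ∧
          (PySem.Str.upper (result.getLastD "")) ∉ pvKeywords ∧
          (result.getLastD "").toList.any (fun c => PySem.Chars.isalpha c) = true
      · rw [if_pos hguard,
          if_pos ⟨hguard.1, hguard.2.1, (attachable_iff _).mp hguard.2.2⟩]
        rw [goB_merging_eq tokens tokens.length (i + 1) 1 [] result (by omega) (by omega)]
        have hge := mergeInnerA_snd_ge tokens tokens.length (i + 1) 1 []
        exact ih _ _ (by omega)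
      · rw [if_neg hguard,
          if_neg (fun hc => hguard ⟨hc.1, hc.2.1, (attachable_iff _).mpr hc.2.2⟩)]
        exact ih (i + 1) (result ++ [tokens.getD i ""]) (by omega)
    · rw [if_neg h, List.drop_eq_nil_of_le (by omega), mergeGoB]
      simp

-- ===== VERDICT (by name: the statement is the Claim_ definition above) =====
theorem merge_spaced_subscripts_py_spec : Claim_equal_merge_spaced_subscripts_py := by
  intro tokens _
  unfold Spec_merge_spaced_subscripts_py merge_spaced_subscripts_py merge_spaced_subscripts_py_alt
  simpa using outerA_eq_goB tokens (tokens.length + 1) 0 [] (by omega)
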